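-- pv_equiv track=rewrite | github.com/vitcra/problems | coursera/stringalgs/week3/suffix_array_long/suffix_array_long.py | build_char_order
-- ===== SOURCE A (Python) =====
-- def build_char_order(text):
--     L = len(text)
--     alphabet = {'$': 0, 'A': 1, 'C': 2, 'G': 3, 'T': 4}
--     A = len(alphabet)
--     count = [0] * A
--     order = [0] * L
--
--     for i in range(L):
--         char = text[i]
--         count[alphabet[char]] += 1
--
--     # convert counts to tails
--     for i in range(1, A):
--         count[i] += count[i-1]
--
--     for i in reversed(range(0, L)):
--         char = text[i]
--         j = alphabet[char]
--         count[j] -= 1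
--         order[count[j]] = i
--
--
--     return order
-- ===== SOURCE B (Python) =====
-- def build_char_order(text):
--     alphabet = {'$': 0, 'A': 1, 'C': 2, 'G': 3, 'T': 4}
--     buckets = [[] for _ in alphabet]
--     for i, ch in enumerate(text):
--         buckets[alphabet[ch]].append(i)
--     order = []
--     for b in buckets:
--         order.extend(b)
--     return order
-- ===== Notes on version B (the rewrite author's own statement) =====
-- stated objective: simpler
-- what changed: Replaces the three-pass counting sort (count, prefix-sum to tails, reverse-order placement into a preallocated array) by a single forward pass that appends each index to its character's bucket list and then concatenates the five buckets in alphabet order; forward bucket-building is stable, matching the reverse-pass counting sort's ascending tie order.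
import Mathlib
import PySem

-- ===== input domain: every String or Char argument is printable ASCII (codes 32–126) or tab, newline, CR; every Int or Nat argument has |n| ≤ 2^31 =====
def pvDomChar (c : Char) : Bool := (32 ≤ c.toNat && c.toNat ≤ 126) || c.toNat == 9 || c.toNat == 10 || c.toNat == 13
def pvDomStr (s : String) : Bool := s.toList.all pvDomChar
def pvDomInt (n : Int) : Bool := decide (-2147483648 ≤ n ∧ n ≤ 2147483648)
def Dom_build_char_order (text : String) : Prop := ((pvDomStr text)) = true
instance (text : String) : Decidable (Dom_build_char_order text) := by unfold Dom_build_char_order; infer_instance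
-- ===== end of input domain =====

-- Port equivalence: A's three-pass counting sort vs B's single forward bucket pass (simpler);
-- both raise KeyError on characters outside {'$','A','C','G','T'}, excluded by Pre_.


-- ===== PORT A =====
-- text[i] for i in range(L) is always in range: total indexing form pyGetD (default never used);
-- alphabet[char] raises KeyError for characters outside the alphabet: total form getD, those inputs are excluded by Pre_.
def build_char_order (text : String) : List Int :=
  let L : Int := PySem.Str.len text
  let alphabet : PySem.Dict Char Int :=
    ((((PySem.Dict.empty.insert '$' 0).insert 'A' 1).insert 'C' 2).insert 'G' 3).insert 'T' 4
  let A : Int := (alphabet.size : Int)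
  let count : List Int := PySem.List.pyRepeat [0] A
  let order : List Int := PySem.List.pyRepeat [0] L
  let count := (PySem.List.pyRange 0 L 1).foldl (fun count i =>
      let char := PySem.List.pyGetD text.toList i ' '
      let j := alphabet.getD char 0
      PySem.List.pySetD count j (PySem.List.pyGetD count j 0 + 1)) count
  let count := (PySem.List.pyRange 1 A 1).foldl (fun count i =>
      PySem.List.pySetD count i (PySem.List.pyGetD count i 0 + PySem.List.pyGetD count (i - 1) 0)) count
  let st := ((PySem.List.pyRange 0 L 1).reverse).foldl (fun (st : List Int × List Int) i =>
      let char := PySem.List.pyGetD text.toList i ' '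
      let j := alphabet.getD char 0
      let count := PySem.List.pySetD st.1 j (PySem.List.pyGetD st.1 j 0 - 1)
      let order := PySem.List.pySetD st.2 (PySem.List.pyGetD count j 0) i
      (count, order)) (count, order)
  st.2

-- ===== PORT B =====
-- same total forms for text indexing and the alphabet lookup as in port A
def build_char_order_alt (text : String) : List Int :=
  let alphabet : PySem.Dict Char Int :=
    ((((PySem.Dict.empty.insert '$' 0).insert 'A' 1).insert 'C' 2).insert 'G' 3).insert 'T' 4
  let buckets : List (List Int) := List.replicate alphabet.size ([] : List Int)
  let buckets := (PySem.List.enumerate text.toList 0).foldl (fun bs p =>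
      let j := alphabet.getD p.2 0
      PySem.List.pySetD bs j (PySem.List.pyGetD bs j [] ++ [p.1])) buckets
  buckets.foldl (fun order b => order ++ b) []

-- ===== PRECONDITION & SPEC =====
-- Pre_ excludes exactly the strings containing a character outside {'$','A','C','G','T'},
-- on which the Python A (and B) raises KeyError.
def Pre_build_char_order (text : String) : Prop :=
  text.toList.all (fun c => (['$', 'A', 'C', 'G', 'T'] : List Char).contains c) = true
instance (text : String) : Decidable (Pre_build_char_order text) := by
  unfold Pre_build_char_order; infer_instance
def pvWitness_build_char_order : String := "ACGT$AGGT"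

def Spec_build_char_order (text : String) (out : List Int) : Prop := out = build_char_order_alt text
instance (text : String) (out : List Int) : Decidable (Spec_build_char_order text out) := by unfold Spec_build_char_order; infer_instance

-- ===== CLAIM (what is proved, stated in full; the proofs are below) =====
def Claim_equal_build_char_order : Prop := ∀ (text : String), Dom_build_char_order text → Pre_build_char_order text → Spec_build_char_order text (build_char_order text)

-- ===== LEMMAS AND PROOFS =====

def pvCl (c : Char) : Nat :=
  if c = '$' then 0 else if c = 'A' then 1 else if c = 'C' then 2 else if c = 'G' then 3 else 4

def pvAlpha : PySem.Dict Char Int :=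
  ((((PySem.Dict.empty.insert '$' 0).insert 'A' 1).insert 'C' 2).insert 'G' 3).insert 'T' 4

def pvM (ds : List Char) (s : Int) (j : Nat) : List Int :=
  ((PySem.List.enumerate ds s).filter (fun p => pvCl p.2 = j)).map (·.1)

lemma pvSet5_0 {α : Type} (b0 b1 b2 b3 b4 v : α) : PySem.List.pySetD [b0,b1,b2,b3,b4] (0:Int) v = [v,b1,b2,b3,b4] := rfl
lemma pvSet5_1 {α : Type} (b0 b1 b2 b3 b4 v : α) : PySem.List.pySetD [b0,b1,b2,b3,b4] (1:Int) v = [b0,v,b2,b3,b4] := rfl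
lemma pvSet5_2 {α : Type} (b0 b1 b2 b3 b4 v : α) : PySem.List.pySetD [b0,b1,b2,b3,b4] (2:Int) v = [b0,b1,v,b3,b4] := rfl
lemma pvSet5_3 {α : Type} (b0 b1 b2 b3 b4 v : α) : PySem.List.pySetD [b0,b1,b2,b3,b4] (3:Int) v = [b0,b1,b2,v,b4] := rfl
lemma pvSet5_4 {α : Type} (b0 b1 b2 b3 b4 v : α) : PySem.List.pySetD [b0,b1,b2,b3,b4] (4:Int) v = [b0,b1,b2,b3,v] := rfl
lemma pvGet5_0 {α : Type} (b0 b1 b2 b3 b4 d : α) : PySem.List.pyGetD [b0,b1,b2,b3,b4] (0:Int) d = b0 := rfl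
lemma pvGet5_1 {α : Type} (b0 b1 b2 b3 b4 d : α) : PySem.List.pyGetD [b0,b1,b2,b3,b4] (1:Int) d = b1 := rfl
lemma pvGet5_2 {α : Type} (b0 b1 b2 b3 b4 d : α) : PySem.List.pyGetD [b0,b1,b2,b3,b4] (2:Int) d = b2 := rfl
lemma pvGet5_3 {α : Type} (b0 b1 b2 b3 b4 d : α) : PySem.List.pyGetD [b0,b1,b2,b3,b4] (3:Int) d = b3 := rfl
lemma pvGet5_4 {α : Type} (b0 b1 b2 b3 b4 d : α) : PySem.List.pyGetD [b0,b1,b2,b3,b4] (4:Int) d = b4 := rfl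
lemma pvAl_d : pvAlpha.getD '$' 0 = 0 := rfl
lemma pvAl_A : pvAlpha.getD 'A' 0 = 1 := rfl
lemma pvAl_C : pvAlpha.getD 'C' 0 = 2 := rfl
lemma pvAl_G : pvAlpha.getD 'G' 0 = 3 := rfl
lemma pvAl_T : pvAlpha.getD 'T' 0 = 4 := rfl

lemma pvM_cons (c : Char) (t : List Char) (s : Int) (j : Nat) :
    pvM (c :: t) s j = (if pvCl c = j then [s] else []) ++ pvM t (s+1) j := by
  simp only [pvM, PySem.List.enumerate_cons, List.filter_cons]
  by_cases h : pvCl c = j <;> simp [h]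

lemma pvB_inv (ds : List Char) : ∀ (s : Int) (b0 b1 b2 b3 b4 : List Int),
    (∀ c ∈ ds, c ∈ (['$', 'A', 'C', 'G', 'T'] : List Char)) →
    (PySem.List.enumerate ds s).foldl (fun bs p =>
        PySem.List.pySetD bs (pvAlpha.getD p.2 0) (PySem.List.pyGetD bs (pvAlpha.getD p.2 0) [] ++ [p.1]))
      [b0, b1, b2, b3, b4]
    = [b0 ++ pvM ds s 0, b1 ++ pvM ds s 1, b2 ++ pvM ds s 2, b3 ++ pvM ds s 3, b4 ++ pvM ds s 4] := by
  induction ds with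
  | nil => intro s b0 b1 b2 b3 b4 _; simp [pvM, PySem.List.enumerate_nil]
  | cons c t ih =>
    intro s b0 b1 b2 b3 b4 h
    have hc : c ∈ (['$', 'A', 'C', 'G', 'T'] : List Char) := h c (by simp)
    have ht : ∀ c' ∈ t, c' ∈ (['$', 'A', 'C', 'G', 'T'] : List Char) := fun c' hc' => h c' (by simp [hc'])
    rw [PySem.List.enumerate_cons, List.foldl_cons]
    fin_cases hc <;>
      simp only [pvAl_d, pvAl_A, pvAl_C, pvAl_G, pvAl_T, pvGet5_0, pvGet5_1, pvGet5_2, pvGet5_3,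
        pvGet5_4, pvSet5_0, pvSet5_1, pvSet5_2, pvSet5_3, pvSet5_4] <;>
      rw [ih _ _ _ _ _ _ ht] <;>
      simp [pvM_cons, pvCl]


lemma pvC_inv (ds : List Char) : ∀ (c0 c1 c2 c3 c4 : Int),
    (∀ c ∈ ds, c ∈ (['$', 'A', 'C', 'G', 'T'] : List Char)) →
    ds.foldl (fun count ch =>
        PySem.List.pySetD count (pvAlpha.getD ch 0) (PySem.List.pyGetD count (pvAlpha.getD ch 0) 0 + 1))
      [c0, c1, c2, c3, c4]
    = [c0 + (ds.countP (fun c => pvCl c = 0) : Int), c1 + (ds.countP (fun c => pvCl c = 1) : Int),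
       c2 + (ds.countP (fun c => pvCl c = 2) : Int), c3 + (ds.countP (fun c => pvCl c = 3) : Int),
       c4 + (ds.countP (fun c => pvCl c = 4) : Int)] := by
  induction ds with
  | nil => intro c0 c1 c2 c3 c4 _; simp
  | cons c t ih =>
    intro c0 c1 c2 c3 c4 h
    have hc : c ∈ (['$', 'A', 'C', 'G', 'T'] : List Char) := h c (by simp)
    have ht : ∀ c' ∈ t, c' ∈ (['$', 'A', 'C', 'G', 'T'] : List Char) := fun c' hc' => h c' (by simp [hc'])
    rw [List.foldl_cons]
    fin_cases hc <;>
      simp only [pvAl_d, pvAl_A, pvAl_C, pvAl_G, pvAl_T, pvGet5_0, pvGet5_1, pvGet5_2, pvGet5_3,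
        pvGet5_4, pvSet5_0, pvSet5_1, pvSet5_2, pvSet5_3, pvSet5_4] <;>
      rw [ih _ _ _ _ _ ht] <;>
      simp [List.countP_cons, pvCl] <;> ring_nf <;> omega

def pvF (cs : List Char) (j n : Nat) : Nat := (cs.take n).countP (fun c => pvCl c = j)
def pvTot (cs : List Char) (j : Nat) : Nat := cs.countP (fun c => pvCl c = j)
def pvOff (cs : List Char) : Nat → Nat
  | 0 => 0
  | j + 1 => pvOff cs j + pvTot cs j
def pvBkt (cs : List Char) (j n : Nat) : List Int := pvM (cs.drop n) (n : Int) j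
def pvSeg (cs : List Char) (j n : Nat) : List Int := List.replicate (pvF cs j n) 0 ++ pvBkt cs j n
def pvCnt (cs : List Char) (n : Nat) : List Int :=
  [((pvOff cs 0 + pvF cs 0 n : Nat) : Int), ((pvOff cs 1 + pvF cs 1 n : Nat) : Int),
   ((pvOff cs 2 + pvF cs 2 n : Nat) : Int), ((pvOff cs 3 + pvF cs 3 n : Nat) : Int),
   ((pvOff cs 4 + pvF cs 4 n : Nat) : Int)]
def pvOrd (cs : List Char) (n : Nat) : List Int :=
  pvSeg cs 0 n ++ (pvSeg cs 1 n ++ (pvSeg cs 2 n ++ (pvSeg cs 3 n ++ pvSeg cs 4 n)))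

lemma pvSetApp (xs ys : List Int) (k : Nat) (v : Int) :
    (xs ++ ys).set (xs.length + k) v = xs ++ ys.set k v := by simp

lemma pvSplice0 (m : Nat) (ys : List Int) (v : Int) :
    (List.replicate (m + 1) (0:Int) ++ ys).set m v = List.replicate m 0 ++ (v :: ys) := by
  rw [List.replicate_succ']
  simp

lemma pvLen_pvM (ds : List Char) (s : Int) (j : Nat) :
    (pvM ds s j).length = ds.countP (fun c => pvCl c = j) := by
  rw [pvM, List.length_map, ← List.countP_eq_length_filter]
  conv_rhs => rw [← PySem.List.map_snd_enumerate ds s]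
  rw [List.countP_map]; rfl

lemma pvF_succ (cs : List Char) (j n : Nat) (c : Char) (h : n < cs.length)
    (hc : cs.getD n ' ' = c) :
    pvF cs j (n + 1) = pvF cs j n + (if pvCl c = j then 1 else 0) := by
  have hg : cs[n]? = some c := by
    rw [List.getElem?_eq_getElem h]; rw [List.getD_eq_getElem cs ' ' h] at hc; rw [hc]
  rw [pvF, pvF, List.take_succ, hg, List.countP_append]
  by_cases hj : pvCl c = j <;> simp [hj]

lemma pvBkt_step (cs : List Char) (j n : Nat) (c : Char) (h : n < cs.length)
    (hc : cs.getD n ' ' = c) :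
    pvBkt cs j n = (if pvCl c = j then [(n : Int)] else []) ++ pvBkt cs j (n + 1) := by
  have hd : cs.drop n = c :: cs.drop (n + 1) := by
    rw [List.getD_eq_getElem cs ' ' h] at hc
    rw [List.drop_eq_getElem_cons h, hc]
  rw [pvBkt, hd, pvM, PySem.List.enumerate_cons, List.filter_cons]
  by_cases hj : pvCl c = j <;>
    simp [hj, pvBkt, pvM, Nat.cast_add]

lemma pvCl_lt (c : Char) : pvCl c < 5 := by
  unfold pvCl; split_ifs <;> omega

lemma pvSeg_len (cs : List Char) (j n : Nat) (h : n ≤ cs.length) :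
    (pvSeg cs j n).length = pvTot cs j := by
  rw [pvSeg, List.length_append, List.length_replicate, pvBkt, pvLen_pvM, pvF, pvTot]
  conv_rhs => rw [← List.take_append_drop n cs]
  rw [List.countP_append]

lemma pvSeg_unch (cs : List Char) (j n : Nat) (c : Char) (hn : n < cs.length)
    (hc : cs.getD n ' ' = c) (h : pvCl c ≠ j) : pvSeg cs j (n + 1) = pvSeg cs j n := by
  rw [pvSeg, pvSeg, pvF_succ cs j n c hn hc, pvBkt_step cs j n c hn hc]
  simp [h]

lemma pvOrd_set (cs : List Char) (n : Nat) (hn : n < cs.length) (c : Char)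
    (hc : cs.getD n ' ' = c) (j : Nat) (hj : pvCl c = j) :
    (pvOrd cs (n + 1)).set (pvOff cs j + pvF cs j n) ((n : Nat) : Int) = pvOrd cs n := by
  have hj5 : j < 5 := hj ▸ pvCl_lt c
  have hn' : n ≤ cs.length := le_of_lt hn
  have hs' : pvSeg cs j (n + 1) = List.replicate (pvF cs j n + 1) 0 ++ pvBkt cs j (n + 1) := by
    rw [pvSeg, pvF_succ cs j n c hn hc]; simp [hj]
  have hs : pvSeg cs j n = List.replicate (pvF cs j n) 0 ++ (((n : Nat) : Int) :: pvBkt cs j (n + 1)) := by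
    rw [pvSeg, pvBkt_step cs j n c hn hc]; simp [hj]
  interval_cases j
  · -- j = 0
    rw [pvOrd, pvOrd,
      pvSeg_unch cs 1 n c hn hc (by omega), pvSeg_unch cs 2 n c hn hc (by omega),
      pvSeg_unch cs 3 n c hn hc (by omega), pvSeg_unch cs 4 n c hn hc (by omega), hs', hs]
    have hidx : pvOff cs 0 + pvF cs 0 n = pvF cs 0 n := by simp [pvOff]
    rw [hidx, List.append_assoc, pvSplice0]
    simp [List.append_assoc]
  · -- j = 1
    rw [pvOrd, pvOrd,
      pvSeg_unch cs 0 n c hn hc (by omega), pvSeg_unch cs 2 n c hn hc (by omega),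
      pvSeg_unch cs 3 n c hn hc (by omega), pvSeg_unch cs 4 n c hn hc (by omega), hs', hs]
    have hidx : pvOff cs 1 + pvF cs 1 n = (pvSeg cs 0 n).length + pvF cs 1 n := by
      rw [pvSeg_len cs 0 n hn']; simp [pvOff]
    rw [hidx, pvSetApp, List.append_assoc, pvSplice0]
    simp [List.append_assoc]
  · -- j = 2
    rw [pvOrd, pvOrd,
      pvSeg_unch cs 0 n c hn hc (by omega), pvSeg_unch cs 1 n c hn hc (by omega),
      pvSeg_unch cs 3 n c hn hc (by omega), pvSeg_unch cs 4 n c hn hc (by omega), hs', hs]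
    have hidx : pvOff cs 2 + pvF cs 2 n
        = (pvSeg cs 0 n).length + ((pvSeg cs 1 n).length + pvF cs 2 n) := by
      rw [pvSeg_len cs 0 n hn', pvSeg_len cs 1 n hn']; simp [pvOff]; omega
    rw [hidx, pvSetApp, pvSetApp, List.append_assoc, pvSplice0]
    simp [List.append_assoc]
  · -- j = 3
    rw [pvOrd, pvOrd,
      pvSeg_unch cs 0 n c hn hc (by omega), pvSeg_unch cs 1 n c hn hc (by omega),
      pvSeg_unch cs 2 n c hn hc (by omega), pvSeg_unch cs 4 n c hn hc (by omega), hs', hs]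
    have hidx : pvOff cs 3 + pvF cs 3 n
        = (pvSeg cs 0 n).length + ((pvSeg cs 1 n).length + ((pvSeg cs 2 n).length + pvF cs 3 n)) := by
      rw [pvSeg_len cs 0 n hn', pvSeg_len cs 1 n hn', pvSeg_len cs 2 n hn']; simp [pvOff]; omega
    rw [hidx, pvSetApp, pvSetApp, pvSetApp, List.append_assoc, pvSplice0]
    simp [List.append_assoc]
  · -- j = 4
    rw [pvOrd, pvOrd,
      pvSeg_unch cs 0 n c hn hc (by omega), pvSeg_unch cs 1 n c hn hc (by omega),
      pvSeg_unch cs 2 n c hn hc (by omega), pvSeg_unch cs 3 n c hn hc (by omega), hs', hs]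
    have hidx : pvOff cs 4 + pvF cs 4 n
        = (pvSeg cs 0 n).length + ((pvSeg cs 1 n).length + ((pvSeg cs 2 n).length
            + ((pvSeg cs 3 n).length + pvF cs 4 n))) := by
      rw [pvSeg_len cs 0 n hn', pvSeg_len cs 1 n hn', pvSeg_len cs 2 n hn', pvSeg_len cs 3 n hn']
      simp [pvOff]; omega
    rw [hidx, pvSetApp, pvSetApp, pvSetApp, pvSetApp, pvSplice0]

lemma pvCl_d : pvCl '$' = 0 := by decide
lemma pvCl_A : pvCl 'A' = 1 := by decide
lemma pvCl_C : pvCl 'C' = 2 := by decide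
lemma pvCl_G : pvCl 'G' = 3 := by decide
lemma pvCl_T : pvCl 'T' = 4 := by decide


lemma pvStep (cs : List Char) (n : Nat) (hn : n < cs.length)
    (hok : ∀ c ∈ cs, c ∈ (['$', 'A', 'C', 'G', 'T'] : List Char)) :
    (PySem.List.pySetD (pvCnt cs (n+1)) (pvAlpha.getD (PySem.List.pyGetD cs ((n:Nat):Int) ' ') 0)
       (PySem.List.pyGetD (pvCnt cs (n+1)) (pvAlpha.getD (PySem.List.pyGetD cs ((n:Nat):Int) ' ') 0) 0 - 1),
     PySem.List.pySetD (pvOrd cs (n+1))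
       (PySem.List.pyGetD
         (PySem.List.pySetD (pvCnt cs (n+1)) (pvAlpha.getD (PySem.List.pyGetD cs ((n:Nat):Int) ' ') 0)
           (PySem.List.pyGetD (pvCnt cs (n+1)) (pvAlpha.getD (PySem.List.pyGetD cs ((n:Nat):Int) ' ') 0) 0 - 1))
         (pvAlpha.getD (PySem.List.pyGetD cs ((n:Nat):Int) ' ') 0) 0)
       ((n:Nat):Int))
    = (pvCnt cs n, pvOrd cs n) := by
  have hcm : cs.getD n ' ' ∈ (['$', 'A', 'C', 'G', 'T'] : List Char) := by
    rw [List.getD_eq_getElem cs ' ' hn]; exact hok _ (List.getElem_mem _)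
  have hcm5 : cs.getD n ' ' = '$' ∨ cs.getD n ' ' = 'A' ∨ cs.getD n ' ' = 'C' ∨
      cs.getD n ' ' = 'G' ∨ cs.getD n ' ' = 'T' := by simpa using hcm
  have hF := fun j => pvF_succ cs j n _ hn rfl
  rcases hcm5 with h|h|h|h|h <;>
    simp only [PySem.List.pyGetD_natCast, h, pvAl_d, pvAl_A, pvAl_C, pvAl_G, pvAl_T, pvCnt,
      pvGet5_0, pvGet5_1, pvGet5_2, pvGet5_3, pvGet5_4, pvSet5_0, pvSet5_1, pvSet5_2, pvSet5_3, pvSet5_4,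
      Prod.mk.injEq] <;>
    rw [h] at hF <;>
    constructor
  -- 10 goals: count-list equality and order equality for each of the 5 characters
  all_goals first
  | (simp only [hF, pvCl_d, pvCl_A, pvCl_C, pvCl_G, pvCl_T, List.cons.injEq, and_true]
     norm_num
     (try push_cast)
     (try omega)
     done)
  | skip
  · have e : ((pvOff cs 0 + pvF cs 0 (n+1) : Nat) : Int) - 1 = ((pvOff cs 0 + pvF cs 0 n : Nat) : Int) := by
      rw [hF 0, pvCl_d]; push_cast; ring
    rw [e, PySem.List.pySetD_natCast]
    exact pvOrd_set cs n hn '$' h 0 (by decide)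
  · have e : ((pvOff cs 1 + pvF cs 1 (n+1) : Nat) : Int) - 1 = ((pvOff cs 1 + pvF cs 1 n : Nat) : Int) := by
      rw [hF 1, pvCl_A]; push_cast; ring
    rw [e, PySem.List.pySetD_natCast]
    exact pvOrd_set cs n hn 'A' h 1 (by decide)
  · have e : ((pvOff cs 2 + pvF cs 2 (n+1) : Nat) : Int) - 1 = ((pvOff cs 2 + pvF cs 2 n : Nat) : Int) := by
      rw [hF 2, pvCl_C]; push_cast; ring
    rw [e, PySem.List.pySetD_natCast]
    exact pvOrd_set cs n hn 'C' h 2 (by decide)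
  · have e : ((pvOff cs 3 + pvF cs 3 (n+1) : Nat) : Int) - 1 = ((pvOff cs 3 + pvF cs 3 n : Nat) : Int) := by
      rw [hF 3, pvCl_G]; push_cast; ring
    rw [e, PySem.List.pySetD_natCast]
    exact pvOrd_set cs n hn 'G' h 3 (by decide)
  · have e : ((pvOff cs 4 + pvF cs 4 (n+1) : Nat) : Int) - 1 = ((pvOff cs 4 + pvF cs 4 n : Nat) : Int) := by
      rw [hF 4, pvCl_T]; push_cast; ring
    rw [e, PySem.List.pySetD_natCast]
    exact pvOrd_set cs n hn 'T' h 4 (by decide)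
def pvLoop1Fn (cs : List Char) (count : List Int) (i : Int) : List Int :=
  let char := PySem.List.pyGetD cs i ' '
  let j := pvAlpha.getD char 0
  PySem.List.pySetD count j (PySem.List.pyGetD count j 0 + 1)

def pvLoop2Fn (count : List Int) (i : Int) : List Int :=
  PySem.List.pySetD count i (PySem.List.pyGetD count i 0 + PySem.List.pyGetD count (i - 1) 0)

def pvStepFnI (cs : List Char) (st : List Int × List Int) (i : Int) : List Int × List Int :=
  let char := PySem.List.pyGetD cs i ' '
  let j := pvAlpha.getD char 0
  let count := PySem.List.pySetD st.1 j (PySem.List.pyGetD st.1 j 0 - 1)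
  (count, PySem.List.pySetD st.2 (PySem.List.pyGetD count j 0) i)

def pvStepFn (cs : List Char) (st : List Int × List Int) (i : Nat) : List Int × List Int :=
  pvStepFnI cs st (i : Int)

lemma pvTot_sum (cs : List Char) :
    pvTot cs 0 + (pvTot cs 1 + (pvTot cs 2 + (pvTot cs 3 + pvTot cs 4))) = cs.length := by
  induction cs with
  | nil => simp [pvTot]
  | cons c t ih =>
    have h5 := pvCl_lt c
    simp only [pvTot, List.countP_cons] at ih ⊢
    interval_cases h : pvCl c <;> simp [h] <;> omega

lemma pvF_len (cs : List Char) (j : Nat) : pvF cs j cs.length = pvTot cs j := by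
  rw [pvF, List.take_length, pvTot]

lemma pvBkt_len_nil (cs : List Char) (j : Nat) : pvBkt cs j cs.length = [] := by
  rw [pvBkt, List.drop_length]
  simp [pvM, PySem.List.enumerate_nil]

lemma pvOrd_init (cs : List Char) : pvOrd cs cs.length = List.replicate cs.length 0 := by
  rw [pvOrd]
  simp only [pvSeg, pvF_len, pvBkt_len_nil, List.append_nil]
  rw [← List.replicate_add, ← List.replicate_add, ← List.replicate_add, ← List.replicate_add,
    pvTot_sum]

lemma pvLoop2_eval (a0 a1 a2 a3 a4 : Int) :
    (PySem.List.pyRange 1 5 1).foldl pvLoop2Fn [a0, a1, a2, a3, a4]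
    = [a0, a1 + a0, a2 + (a1 + a0), a3 + (a2 + (a1 + a0)), a4 + (a3 + (a2 + (a1 + a0)))] := rfl

lemma pvTot_eq (cs : List Char) (j : Nat) :
    List.countP (fun c => decide (pvCl c = j)) cs = pvTot cs j := rfl

lemma pvCnt_init (cs : List Char) :
    [((pvTot cs 0 : Nat) : Int), ((pvTot cs 1 : Nat) : Int) + ((pvTot cs 0 : Nat) : Int),
     ((pvTot cs 2 : Nat) : Int) + (((pvTot cs 1 : Nat) : Int) + ((pvTot cs 0 : Nat) : Int)),
     ((pvTot cs 3 : Nat) : Int) + (((pvTot cs 2 : Nat) : Int) + (((pvTot cs 1 : Nat) : Int) + ((pvTot cs 0 : Nat) : Int))),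
     ((pvTot cs 4 : Nat) : Int) + (((pvTot cs 3 : Nat) : Int) + (((pvTot cs 2 : Nat) : Int) + (((pvTot cs 1 : Nat) : Int) + ((pvTot cs 0 : Nat) : Int))))]
    = pvCnt cs cs.length := by
  simp only [pvCnt, pvOff, pvF_len, List.cons.injEq, and_true]
  refine ⟨by omega, by omega, by omega, by omega, by omega⟩

lemma pvStep' (cs : List Char) (n : Nat) (hn : n < cs.length)
    (hok : ∀ c ∈ cs, c ∈ (['$', 'A', 'C', 'G', 'T'] : List Char)) :
    pvStepFn cs (pvCnt cs (n + 1), pvOrd cs (n + 1)) n = (pvCnt cs n, pvOrd cs n) :=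
  pvStep cs n hn hok

lemma pvA_loop3 (cs : List Char)
    (hok : ∀ c ∈ cs, c ∈ (['$', 'A', 'C', 'G', 'T'] : List Char)) :
    ∀ n, n ≤ cs.length →
      (List.range n).reverse.foldl (pvStepFn cs) (pvCnt cs n, pvOrd cs n)
        = (pvCnt cs 0, pvOrd cs 0) := by
  intro n
  induction n with
  | zero => intro _; simp
  | succ n ih =>
    intro h
    rw [List.range_succ, List.reverse_append]
    simp only [List.reverse_singleton, List.singleton_append, List.foldl_cons]
    rw [pvStep' cs n (by omega) hok]
    exact ih (by omega)

lemma pvL3cast (cs : List Char) (st : List Int × List Int) :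
    (PySem.List.pyRange 0 ((cs.length : Nat) : Int) 1).reverse.foldl (pvStepFnI cs) st
    = (List.range cs.length).reverse.foldl (pvStepFn cs) st := by
  rw [PySem.List.pyRange_zero_nat, ← List.map_reverse, List.foldl_map]
  rfl

lemma pvOrd_zero (cs : List Char) :
    pvOrd cs 0 = pvBkt cs 0 0 ++ (pvBkt cs 1 0 ++ (pvBkt cs 2 0 ++ (pvBkt cs 3 0 ++ pvBkt cs 4 0))) := by
  simp [pvOrd, pvSeg, pvF]
theorem build_char_order_spec' (text : String)
    (hok : ∀ c ∈ text.toList, c ∈ (['$', 'A', 'C', 'G', 'T'] : List Char)) :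
    build_char_order text = build_char_order_alt text := by
  have hA : build_char_order text =
      ((PySem.List.pyRange 0 ((text.toList.length : Nat) : Int) 1).reverse.foldl
          (pvStepFnI text.toList)
          ((PySem.List.pyRange 1 5 1).foldl pvLoop2Fn
            ((PySem.List.pyRange 0 ((text.toList.length : Nat) : Int) 1).foldl
              (pvLoop1Fn text.toList) [0, 0, 0, 0, 0]),
           PySem.List.pyRepeat [0] ((text.toList.length : Nat) : Int))).2 := rfl
  have hB : build_char_order_alt text =
      ((PySem.List.enumerate text.toList 0).foldl (fun bs p =>
          PySem.List.pySetD bs (pvAlpha.getD p.2 0)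
            (PySem.List.pyGetD bs (pvAlpha.getD p.2 0) [] ++ [p.1]))
        [[], [], [], [], []]).foldl (fun order b => order ++ b) [] := rfl
  set cs := text.toList with hcs
  have h1 : (PySem.List.pyRange 0 ((cs.length : Nat) : Int) 1).foldl (pvLoop1Fn cs) [0, 0, 0, 0, 0]
      = cs.foldl (fun count ch =>
          PySem.List.pySetD count (pvAlpha.getD ch 0)
            (PySem.List.pyGetD count (pvAlpha.getD ch 0) 0 + 1)) [0, 0, 0, 0, 0] :=
    PySem.List.foldl_pyRange_zero_pyGetD' cs ' '
      (fun count ch =>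
        PySem.List.pySetD count (pvAlpha.getD ch 0)
          (PySem.List.pyGetD count (pvAlpha.getD ch 0) 0 + 1)) [0, 0, 0, 0, 0]
  have hrep : PySem.List.pyRepeat [(0:Int)] ((cs.length : Nat) : Int) = pvOrd cs cs.length := by
    rw [PySem.List.pyRepeat_singleton, pvOrd_init]
    simp
  rw [hA, hB, h1, pvC_inv cs 0 0 0 0 0 hok]
  simp only [zero_add]
  rw [pvLoop2_eval]
  simp only [pvTot_eq]
  rw [pvCnt_init, hrep, pvL3cast, pvA_loop3 cs hok cs.length le_rfl]
  rw [pvB_inv cs 0 [] [] [] [] [] hok]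
  simp only [List.foldl, List.nil_append]
  rw [pvOrd_zero]
  simp [pvBkt, List.append_assoc]
-- ===== VERDICT (by name: the statement is the Claim_ definition above) =====
theorem build_char_order_spec : Claim_equal_build_char_order := by
  intro text _ hpre
  unfold Spec_build_char_order
  refine build_char_order_spec' text ?_
  intro c hc
  simpa using List.all_eq_true.mp hpre c hc
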